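-- pv_equiv track=rewrite | github.com/bassbreaker/notesToBibleRipper | pdfGrabberDude.py | listWords
-- ===== SOURCE A (Python) =====
-- def listWords(textIn):
--     key = "Home Church Questions"
--     page1 = textIn.split(key)
--     page1 = page1[0]
--     wordList = []
--     beg = 0
--     pos = 0
--     while pos < len(page1):
--         if ord(page1[pos]) > 122 or ord(page1[pos]) < 44 or ord(page1[pos])==46:
--             wordList.append(page1[beg:pos])
--             beg = pos+1
--         pos = pos+1
--     return wordList
-- ===== SOURCE B (Python) =====
-- def listWords(textIn):
--     page1 = textIn.split("Home Church Questions")[0]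
--     def isdelim(c):
--         o = ord(c)
--         return o > 122 or o < 44 or o == 46
--     out = []
--     while True:
--         i = next((k for k, c in enumerate(page1) if isdelim(c)), None)
--         if i is None:
--             return out
--         out.append(page1[:i])
--         page1 = page1[i + 1:]
-- ===== Notes on version B (the rewrite author's own statement) =====
-- stated objective: alternative
-- what changed: Replaces A's per-character index-cursor scan with beg/pos slice bookkeeping by a head-chunking loop: repeatedly find the first delimiter, emit the prefix before it, and continue on the remaining suffix.
import Mathlib
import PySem

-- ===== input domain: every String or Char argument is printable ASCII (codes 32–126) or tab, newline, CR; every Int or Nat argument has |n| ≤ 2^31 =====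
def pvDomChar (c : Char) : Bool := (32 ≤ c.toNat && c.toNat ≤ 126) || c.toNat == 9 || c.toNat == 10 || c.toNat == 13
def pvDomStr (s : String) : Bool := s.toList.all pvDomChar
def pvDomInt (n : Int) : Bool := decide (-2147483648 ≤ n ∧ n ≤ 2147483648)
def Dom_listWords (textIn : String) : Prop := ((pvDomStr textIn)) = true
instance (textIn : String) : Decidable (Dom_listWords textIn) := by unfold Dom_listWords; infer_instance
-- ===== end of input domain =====

-- B replaces A's cursor-with-pending-slice scan by a head-chunking loop (find first delimiter,
-- emit prefix, recurse on suffix); same cost, alternative structure.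

-- ===== PORT A =====
-- the delimiter test from A's `if`: ord(c) > 122 or ord(c) < 44 or ord(c) == 46
def pvDelimA (c : Char) : Bool := c.toNat > 122 || c.toNat < 44 || c.toNat == 46

-- A's while loop over page1 with state beg/pos/acc; page1[beg:pos] with 0 ≤ beg ≤ pos is
-- exactly (take pos).drop beg, indexing page1[pos] is guarded by pos < len (exact).
def pvALoop (page1 : List Char) (beg pos : Nat) (acc : List String) : List String :=
  if h : pos < page1.length then
    if pvDelimA page1[pos] then
      pvALoop page1 (pos + 1) (pos + 1) (acc ++ [String.ofList ((page1.take pos).drop beg)])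
    else
      pvALoop page1 beg (pos + 1) acc
  else acc
termination_by page1.length - pos

-- textIn.split(key)[0]: split with a nonempty separator always returns a nonempty list,
-- so headD "" is exact for page1[0].
def listWords (textIn : String) : List String :=
  let page1 := (PySem.Chars.splitOn textIn.toList "Home Church Questions".toList).headD []
  pvALoop page1 0 0 []

-- ===== PORT B =====
-- Source B's isdelim
def pvDelimB (c : Char) : Bool := c.toNat > 122 || c.toNat < 44 || c.toNat == 46

-- Source B's while loop: find first delimiter index (next/enumerate = findIdx?), emit the
-- prefix before it, continue on the suffix after it; None → return out.
def pvBChunks (s : List Char) : List String :=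
  match h : s.findIdx? pvDelimB with
  | none => []
  | some i => String.ofList (s.take i) :: pvBChunks (s.drop (i + 1))
termination_by s.length
decreasing_by
  have := List.findIdx?_eq_some_iff_findIdx_eq.mp h
  simp; omega

def listWords_alt (textIn : String) : List String :=
  let page1 := (PySem.Chars.splitOn textIn.toList "Home Church Questions".toList).headD []
  pvBChunks page1

-- ===== PRECONDITION & SPEC =====
def Spec_listWords (textIn : String) (out : List String) : Prop := out = listWords_alt textIn
instance (textIn : String) (out : List String) : Decidable (Spec_listWords textIn out) := by unfold Spec_listWords; infer_instance

-- ===== CLAIM (what is proved, stated in full; the proofs are below) =====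
def Claim_equal_listWords : Prop := ∀ (textIn : String), Dom_listWords textIn → Spec_listWords textIn (listWords textIn)

-- ===== LEMMAS AND PROOFS =====

-- accumulator-style chunking: common ground between the two loops
def pvChunk (t : List Char) : List Char → List String
  | [] => []
  | c :: rest => if pvDelimA c then String.ofList t :: pvChunk [] rest else pvChunk (t ++ [c]) rest

theorem pvALoop_eq (page1 : List Char) :
    ∀ (k pos beg : Nat) (acc : List String), page1.length - pos ≤ k → beg ≤ pos →
      pvALoop page1 beg pos acc = acc ++ pvChunk ((page1.take pos).drop beg) (page1.drop pos) := by
  intro k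
  induction k with
  | zero =>
    intro pos beg acc hk _
    rw [pvALoop, dif_neg (by omega)]
    rw [show page1.drop pos = [] from List.drop_eq_nil_of_le (by omega)]
    simp [pvChunk]
  | succ k ih =>
    intro pos beg acc hk hb
    by_cases h : pos < page1.length
    · rw [pvALoop, dif_pos h]
      rw [← List.getElem_cons_drop h, pvChunk]
      by_cases hdl : pvDelimA page1[pos]
      · rw [if_pos hdl, if_pos hdl]
        rw [ih (pos + 1) (pos + 1) _ (by omega) le_rfl]
        rw [show List.drop (pos + 1) (List.take (pos + 1) page1) = [] from
              List.drop_eq_nil_of_le (by simp)]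
        simp
      · rw [if_neg hdl, if_neg hdl]
        rw [ih (pos + 1) beg acc (by omega) (by omega)]
        congr 2
        rw [List.take_add_one, List.getElem?_eq_getElem h]
        rw [List.drop_append_of_le_length (by simp; omega)]
        rfl
    · rw [pvALoop, dif_neg h]
      rw [show page1.drop pos = [] from List.drop_eq_nil_of_le (by omega)]
      simp [pvChunk]

theorem pvChunk_find (s : List Char) : ∀ (t : List Char),
    pvChunk t s = match s.findIdx? pvDelimA with
      | none => []
      | some i => String.ofList (t ++ s.take i) :: pvChunk [] (s.drop (i + 1)) := by
  induction s with
  | nil => intro t; simp [pvChunk]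
  | cons c rest ih =>
    intro t
    rw [pvChunk, List.findIdx?_cons]
    by_cases h : pvDelimA c
    · simp [h]
    · rw [if_neg h, if_neg h, ih (t ++ [c])]
      cases hf : rest.findIdx? pvDelimA with
      | none => simp
      | some j => simp [List.take_succ_cons, List.drop_succ_cons]

theorem pvDelim_eq : pvDelimA = pvDelimB := rfl

theorem pvChunk_eq_bChunks (s : List Char) : pvChunk [] s = pvBChunks s := by
  induction hn : s.length using Nat.strong_induction_on generalizing s with
  | _ n ih =>
    rw [pvChunk_find, pvBChunks, pvDelim_eq]
    cases hf : s.findIdx? pvDelimB with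
    | none => rfl
    | some i =>
      have hi := List.findIdx?_eq_some_iff_findIdx_eq.mp hf
      simp only [List.nil_append]
      rw [ih ((s.drop (i + 1)).length) (by simp; omega) _ rfl]

-- ===== VERDICT (by name: the statement is the Claim_ definition above) =====
theorem listWords_spec : Claim_equal_listWords := by
  intro textIn _
  unfold Spec_listWords listWords listWords_alt
  rw [pvALoop_eq _ (((PySem.Chars.splitOn textIn.toList "Home Church Questions".toList).headD []).length) 0 0 [] (by omega) le_rfl]
  simp [pvChunk_eq_bChunks]
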